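-- pv_equiv track=rewrite | github.com/ericxiwang/flask_demo | app/api/list_operation.py | fib_array_loop
-- ===== SOURCE A (Python) =====
-- def fib_array_loop(array_len):
--     fib_array = []
--     if array_len <= 1:
--         return fib_array.append(array_len)
--     a, b = 1, 1
--     for i in range(2, array_len + 1):
--         a, b = b, a + b
--         fib_array.append(a)
--         fib_array.append(b)
--     return sorted(list(set(fib_array)))
-- ===== SOURCE B (Python) =====
-- def fib_array_loop(array_len):
--     if array_len <= 1:
--         return None
--     fib = [1, 2]
--     for i in range(3, array_len + 1):
--         fib.append(fib[-1] + fib[-2])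
--     return fib
-- ===== Notes on version B (the rewrite author's own statement) =====
-- stated objective: simpler
-- what changed: B generates the distinct ascending Fibonacci list directly in one pass (appending one new element per step), eliminating A's duplicate pair-appends followed by set() deduplication and sorted() post-processing.
import Mathlib
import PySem

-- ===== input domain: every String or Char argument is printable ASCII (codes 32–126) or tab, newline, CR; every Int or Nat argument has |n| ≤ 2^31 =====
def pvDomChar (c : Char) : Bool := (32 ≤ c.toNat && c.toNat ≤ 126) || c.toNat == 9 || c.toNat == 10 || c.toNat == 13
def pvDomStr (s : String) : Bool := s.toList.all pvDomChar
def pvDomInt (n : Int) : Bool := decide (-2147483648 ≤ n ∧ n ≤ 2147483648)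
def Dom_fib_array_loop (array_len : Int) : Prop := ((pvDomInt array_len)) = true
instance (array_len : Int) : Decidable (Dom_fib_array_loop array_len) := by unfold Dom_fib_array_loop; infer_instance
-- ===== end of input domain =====

-- B builds the distinct ascending Fibonacci list in one pass, without A's duplicate pair-appends, set() dedup and sorted() post-processing.


-- ===== PORT A =====
def fib_array_loop (array_len : Int) : Option (List Int) :=
  if array_len ≤ 1 then
    none  -- 'return fib_array.append(array_len)': list.append returns None
  else
    let st := (PySem.List.pyRange 2 (array_len + 1) 1).foldl
      (fun (st : Int × Int × List Int) _ =>
        (st.2.1, st.1 + st.2.1, st.2.2 ++ [st.2.1, st.1 + st.2.1]))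
      (1, 1, [])
    some (PySem.List.sorted (PySem.Set.ofList st.2.2) (fun x => x) false)

-- ===== PORT B =====
-- fib[-1] / fib[-2] are ported with pyGet?; '.getD 0' is exact: fib always has ≥ 2 elements.
def fib_array_loop_alt (array_len : Int) : Option (List Int) :=
  if array_len ≤ 1 then
    none
  else
    some ((PySem.List.pyRange 3 (array_len + 1) 1).foldl
      (fun fib _ =>
        fib ++ [((PySem.List.pyGet? fib (-1)).getD 0) + ((PySem.List.pyGet? fib (-2)).getD 0)])
      [1, 2])

-- ===== PRECONDITION & SPEC =====
def Spec_fib_array_loop (array_len : Int) (out : Option (List Int)) : Prop := out = fib_array_loop_alt array_len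
instance (array_len : Int) (out : Option (List Int)) : Decidable (Spec_fib_array_loop array_len out) := by unfold Spec_fib_array_loop; infer_instance

-- ===== CLAIM (what is proved, stated in full; the proofs are below) =====
def Claim_equal_fib_array_loop : Prop := ∀ (array_len : Int), Dom_fib_array_loop array_len → Spec_fib_array_loop array_len (fib_array_loop array_len)

-- ===== LEMMAS AND PROOFS =====

-- pure Fibonacci sequence 1, 1, 2, 3, 5, …
def fibf : Nat → Int
  | 0 => 1
  | 1 => 1
  | (n + 2) => fibf n + fibf (n + 1)

-- [fibf 1, …, fibf (k+1)] — the expected result for k loop iterations of A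
def Mlist : Nat → List Int
  | 0 => [1]
  | (k + 1) => Mlist k ++ [fibf (k + 2)]

-- the raw list A accumulates after k iterations
def arrA : Nat → List Int
  | 0 => []
  | (k + 1) => arrA k ++ [fibf (k + 1), fibf (k + 2)]

def stepA (st : Int × Int × List Int) : Int × Int × List Int :=
  (st.2.1, st.1 + st.2.1, st.2.2 ++ [st.2.1, st.1 + st.2.1])

def stepB (fib : List Int) : List Int :=
  fib ++ [((PySem.List.pyGet? fib (-1)).getD 0) + ((PySem.List.pyGet? fib (-2)).getD 0)]

theorem foldl_ignore {α σ : Type} (g : σ → σ) :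
    ∀ (l : List α) (s : σ), l.foldl (fun s _ => g s) s = g^[l.length] s
  | [], _ => rfl
  | _ :: t, s => by
      simp only [List.foldl_cons, List.length_cons, Function.iterate_succ_apply]
      exact foldl_ignore g t (g s)

theorem fib_pos : ∀ n, 1 ≤ fibf n
  | 0 => le_refl 1
  | 1 => le_refl 1
  | (n + 2) => by
      have h1 := fib_pos n
      have h2 := fib_pos (n + 1)
      simp only [fibf]; omega

theorem fib_lt (n : Nat) : fibf (n + 1) < fibf (n + 2) := by
  have := fib_pos n
  simp only [fibf]; omega

theorem length_Mlist : ∀ k, (Mlist k).length = k + 1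
  | 0 => rfl
  | (k + 1) => by simp [Mlist, length_Mlist k]

theorem Mlist_bound : ∀ k, ∀ x ∈ Mlist k, x < fibf (k + 2)
  | 0 => by intro x hx; simp [Mlist] at hx; subst hx; decide
  | (k + 1) => by
      intro x hx
      simp only [Mlist, List.mem_append, List.mem_singleton] at hx
      rcases hx with h | h
      · exact lt_trans (Mlist_bound k x h) (fib_lt (k + 1))
      · subst h; exact fib_lt (k + 1)

theorem Mlist_last_mem : ∀ k, fibf (k + 1) ∈ Mlist k
  | 0 => by decide
  | (k + 1) => by simp [Mlist]

theorem Mlist_pairwise : ∀ k, (Mlist k).Pairwise (· < ·)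
  | 0 => by decide
  | (k + 1) => by
      simp only [Mlist]
      refine List.pairwise_append.mpr ⟨Mlist_pairwise k, List.pairwise_singleton _ _, ?_⟩
      intro x hx y hy
      simp only [List.mem_singleton] at hy; subst hy
      exact Mlist_bound k x hx

theorem stateA : ∀ k, stepA^[k] (1, 1, ([] : List Int)) = (fibf k, fibf (k + 1), arrA k)
  | 0 => rfl
  | (k + 1) => by
      rw [Function.iterate_succ_apply', stateA k]
      simp only [stepA, arrA]
      refine Prod.ext rfl (Prod.ext rfl ?_)
      have : fibf (k + 2) = fibf k + fibf (k + 1) := rfl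
      simp [this]

theorem ofList_arrA : ∀ k, 1 ≤ k → PySem.Set.ofList (arrA k) = Mlist k := by
  intro k hk
  induction k with
  | zero => omega
  | succ k ih =>
      by_cases hk1 : 1 ≤ k
      · have harr : arrA (k + 1) = (arrA k ++ [fibf (k + 1)]) ++ [fibf (k + 2)] := by
          simp [arrA]
        rw [harr, PySem.Set.ofList_append_singleton, PySem.Set.ofList_append_singleton, ih hk1]
        rw [PySem.Set.add_of_mem (Mlist_last_mem k)]
        rw [PySem.Set.add_of_not_mem (fun h => lt_irrefl _ (Mlist_bound k _ h))]
        rfl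
      · have : k = 0 := by omega
        subst this; decide

theorem pyGet_neg2 (l : List Int) (x y : Int) :
    PySem.List.pyGet? ((l ++ [x]) ++ [y]) (-2) = some x := by
  rw [PySem.List.pyGet?_neg_ofNat _ 2 (by norm_num) (by simp)]
  have h : ((l ++ [x]) ++ [y]).length - 2 = l.length := by simp
  rw [h, List.getElem?_append_left (by simp), List.getElem?_concat_length]

theorem stepB_Mlist : ∀ m, stepB (Mlist (m + 1)) = Mlist (m + 2)
  | 0 => by decide
  | (m + 1) => by
      have h2 : Mlist (m + 2) = (Mlist m ++ [fibf (m + 2)]) ++ [fibf (m + 3)] := by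
        simp [Mlist]
      rw [h2]
      simp only [stepB]
      rw [PySem.List.pyGet?_neg_one_append_singleton, pyGet_neg2]
      simp only [Option.getD_some]
      have h3 : fibf (m + 3) + fibf (m + 2) = fibf (m + 4) := by
        simp only [fibf]; ring
      rw [h3]
      simp [Mlist, List.append_assoc]

theorem stateB : ∀ m, stepB^[m] [1, 2] = Mlist (m + 1)
  | 0 => by decide
  | (m + 1) => by
      rw [Function.iterate_succ_apply', stateB m, stepB_Mlist m]

-- ===== VERDICT (by name: the statement is the Claim_ definition above) =====
theorem fib_array_loop_spec : Claim_equal_fib_array_loop := by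
  intro n _
  unfold Spec_fib_array_loop fib_array_loop fib_array_loop_alt
  by_cases h : n ≤ 1
  · simp [h]
  · simp only [h, if_false]
    have hn : 2 ≤ n := by omega
    set k : Nat := (n - 1).toNat with hk
    have hk1 : 1 ≤ k := by omega
    -- A's loop
    have hA : (PySem.List.pyRange 2 (n + 1) 1).foldl
        (fun (st : Int × Int × List Int) _ =>
          (st.2.1, st.1 + st.2.1, st.2.2 ++ [st.2.1, st.1 + st.2.1])) (1, 1, []) =
        (fibf k, fibf (k + 1), arrA k) := by
      show (PySem.List.pyRange 2 (n + 1) 1).foldl (fun s _ => stepA s) (1, 1, []) =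
        (fibf k, fibf (k + 1), arrA k)
      rw [foldl_ignore stepA, PySem.List.length_pyRange_one]
      have : (n + 1 - 2).toNat = k := by omega
      rw [this, stateA]
    -- B's loop
    have hB : (PySem.List.pyRange 3 (n + 1) 1).foldl
        (fun fib _ =>
          fib ++ [((PySem.List.pyGet? fib (-1)).getD 0) + ((PySem.List.pyGet? fib (-2)).getD 0)])
        [1, 2] = Mlist k := by
      show (PySem.List.pyRange 3 (n + 1) 1).foldl (fun s _ => stepB s) [1, 2] = Mlist k
      rw [foldl_ignore stepB, PySem.List.length_pyRange_one]
      have h2 : (n + 1 - 3).toNat = k - 1 := by omega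
      rw [h2]
      have := stateB (k - 1)
      rwa [show k - 1 + 1 = k by omega] at this
    rw [hA, hB, ofList_arrA k hk1]
    congr 1
    apply PySem.List.sorted_eq_self_of_pairwise
    exact (Mlist_pairwise k).imp (fun h => le_of_lt h)
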